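-- pv_equiv track=rewrite | github.com/gudgud96/ChordAL | evaluation/melody_evaluation.py | evaluate_repeat
-- ===== SOURCE A (Python) =====
-- def evaluate_repeat(notes):
--     length_lst = []
--     prev = notes[0]
--     cur_length = 1
--     for i in range(1, len(notes)):
--         if notes[i] == prev:
--             cur_length += 1
--         else:
--             length_lst.append(cur_length)
--             cur_length = 1
--         prev = notes[i]
--     length_lst.append(cur_length)
--     return length_lst
-- ===== SOURCE B (Python) =====
-- def evaluate_repeat(notes):
--     n = len(notes)
--     edges = [0] + [i for i in range(1, n) if notes[i] != notes[i - 1]] + [n]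
--     return [edges[k + 1] - edges[k] for k in range(len(edges) - 1)]
-- ===== Notes on version B (the rewrite author's own statement) =====
-- stated objective: alternative
-- what changed: Instead of A's running prev/counter accumulation, B first computes the list of boundary positions where the value changes (plus 0 and n) and then returns the adjacent differences of those edge indices; run lengths never counted, only positions subtracted. On the empty list A raises IndexError (excluded by Pre_).
-- outside the precondition, e.g. on evaluate_repeat([]): A raises IndexError, B returns [0]
import Mathlib
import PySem

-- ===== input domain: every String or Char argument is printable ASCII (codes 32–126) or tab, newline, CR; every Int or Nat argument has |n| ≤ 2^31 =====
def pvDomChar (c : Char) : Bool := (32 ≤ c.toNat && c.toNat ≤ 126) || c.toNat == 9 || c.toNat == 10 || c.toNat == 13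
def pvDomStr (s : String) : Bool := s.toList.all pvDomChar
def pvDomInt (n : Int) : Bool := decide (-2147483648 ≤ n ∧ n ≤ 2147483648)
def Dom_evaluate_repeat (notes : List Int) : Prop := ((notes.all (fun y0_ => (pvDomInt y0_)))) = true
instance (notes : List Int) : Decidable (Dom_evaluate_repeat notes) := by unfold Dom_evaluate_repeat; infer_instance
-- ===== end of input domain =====

-- B replaces A's running prev/counter loop by boundary positions + adjacent differences (alternative
-- algorithm, same cost); on the empty list A raises IndexError (excluded by Pre_).

-- ===== PORT A =====
-- A's loop 'for i in range(1, len(notes))' reads notes[i] in order; ported as a fold over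
-- notes.drop 1 carrying the same state (length_lst, prev, cur_length).
def evaluate_repeat (notes : List Int) : List Int :=
  match notes with
  | [] => []   -- unreached under Pre_: Python raises IndexError at notes[0]
  | n0 :: rest =>
    let st := rest.foldl
      (fun (s : List Int × Int × Int) x =>
        let (length_lst, prev, cur_length) := s
        if x = prev then (length_lst, prev, cur_length + 1)
        else (length_lst ++ [cur_length], x, 1))
      ([], n0, 1)
    st.1 ++ [st.2.2]

-- ===== PORT B =====
-- edges = [0] + positions where the value changes + [n]; result = adjacent differences.
-- (pyGetD with default 0: every index the comprehension produces is in range.)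
def evaluate_repeat_alt (notes : List Int) : List Int :=
  let n : Int := notes.length
  let edges : List Int :=
    0 :: ((PySem.List.pyRange 1 n 1).filter
            (fun i => PySem.List.pyGetD notes i 0 != PySem.List.pyGetD notes (i - 1) 0)
          ++ [n])
  (PySem.List.pyRange 0 ((edges.length : Int) - 1) 1).map
    (fun k => PySem.List.pyGetD edges (k + 1) 0 - PySem.List.pyGetD edges k 0)

-- ===== PRECONDITION & SPEC =====
-- Pre_ excludes only the empty list, on which Python A raises IndexError.
def Pre_evaluate_repeat (notes : List Int) : Prop := notes ≠ []
instance (notes : List Int) : Decidable (Pre_evaluate_repeat notes) := by unfold Pre_evaluate_repeat; infer_instance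
def pvWitness_evaluate_repeat : List Int := [60, 60, 62]

def Spec_evaluate_repeat (notes : List Int) (out : List Int) : Prop := out = evaluate_repeat_alt notes
instance (notes : List Int) (out : List Int) : Decidable (Spec_evaluate_repeat notes out) := by unfold Spec_evaluate_repeat; infer_instance

-- ===== CLAIM =====
def Claim_equal_evaluate_repeat : Prop := ∀ (notes : List Int), Dom_evaluate_repeat notes → Pre_evaluate_repeat notes → Spec_evaluate_repeat notes (evaluate_repeat notes)

-- ===== LEMMAS AND PROOFS =====

-- run lengths of consecutive equal elements: common abstract description of both ports
def runLengths (x : Int) (n : Int) : List Int → List Int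
  | [] => [n]
  | y :: ys => if y = x then runLengths x (n + 1) ys else n :: runLengths y 1 ys

-- adjacent differences of a list of edges, starting from a
def diffs : Int → List Int → List Int
  | _, [] => []
  | a, b :: bs => (b - a) :: diffs b bs

theorem foldl_run (xs : List Int) : ∀ (prev cur : Int) (acc : List Int),
    (let st := xs.foldl
      (fun (s : List Int × Int × Int) x =>
        let (length_lst, p, c) := s
        if x = p then (length_lst, p, c + 1)
        else (length_lst ++ [c], x, 1))
      (acc, prev, cur)
     st.1 ++ [st.2.2]) = acc ++ runLengths prev cur xs := by
  induction xs with
  | nil => intro prev cur acc; simp [runLengths]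
  | cons y ys ih =>
    intro prev cur acc
    by_cases h : y = prev
    · simp [List.foldl, h, runLengths, ih]
    · simp [List.foldl, h, runLengths, ih]

theorem map_diffs (es : List Int) : ∀ (a : Int),
    (List.range es.length).map
      (fun k => (a :: es).getD (k + 1) 0 - (a :: es).getD k 0) = diffs a es := by
  induction es with
  | nil => intro a; simp [diffs]
  | cons b bs ih =>
    intro a
    rw [List.length_cons, List.range_succ_eq_map, List.map_cons, List.map_map]
    have ht : (List.range bs.length).map
        ((fun k => (a :: b :: bs).getD (k + 1) 0 - (a :: b :: bs).getD k 0) ∘ Nat.succ)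
        = (List.range bs.length).map
        (fun k => (b :: bs).getD (k + 1) 0 - (b :: bs).getD k 0) := by
      apply List.map_congr_left
      intro k _
      simp [Function.comp]
    rw [ht, ih b]
    simp [diffs]

-- boundary positions from j onwards, differenced, give the run lengths of the suffix
theorem key (l : List Int) : ∀ (ys : List Int) (j : Nat) (x c : Int),
    l.drop j = ys → 1 ≤ j → j ≤ l.length → l.getD (j - 1) 0 = x →
    diffs ((j : Int) - c)
      ((PySem.List.pyRange (j : Int) (l.length : Int) 1).filter
          (fun i => PySem.List.pyGetD l i 0 != PySem.List.pyGetD l (i - 1) 0)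
        ++ [(l.length : Int)])
      = runLengths x c ys := by
  intro ys
  induction ys with
  | nil =>
    intro j x c hdrop hj1 hjn hx
    have hj : j = l.length := by
      have := List.drop_eq_nil_iff.mp hdrop; omega
    subst hj
    rw [PySem.List.pyRange_one_eq_nil le_rfl]
    simp [diffs, runLengths]
  | cons y ys ih =>
    intro j x c hdrop hj1 hjn hx
    have hjlt : j < l.length := by
      have := congrArg List.length hdrop
      simp [List.length_drop] at this; omega
    have h0 : l[j]? = some y := by
      have h1 : (l.drop j)[0]? = some y := by rw [hdrop]; rfl
      simpa [List.getElem?_drop] using h1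
    have hy : l.getD j 0 = y := by
      rw [List.getD_eq_getElem?_getD, h0]; rfl
    have hdrop' : l.drop (j + 1) = ys := by
      rw [← List.drop_drop, hdrop]; simp
    have hcast : ((j : Int)) < (l.length : Int) := by exact_mod_cast hjlt
    rw [PySem.List.pyRange_one_cons hcast]
    have hgj : PySem.List.pyGetD l (j : Int) 0 = y := by
      rw [PySem.List.pyGetD_natCast]; exact hy
    have hgj1 : PySem.List.pyGetD l ((j : Int) - 1) 0 = x := by
      have hc : (j : Int) - 1 = ((j - 1 : Nat) : Int) := by omega
      rw [hc, PySem.List.pyGetD_natCast]; exact hx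
    by_cases hxy : y = x
    · -- same as previous: boundary filter drops j, run continues
      have hcond : (PySem.List.pyGetD l (j : Int) 0 != PySem.List.pyGetD l ((j : Int) - 1) 0) = false := by
        rw [hgj, hgj1, hxy]; simp
      rw [List.filter_cons_of_neg (by rw [hcond]; simp)]
      have hih := ih (j + 1) x (c + 1) hdrop' (by omega) (by omega) (by simpa using hy.trans hxy)
      have harg : ((j + 1 : Nat) : Int) - (c + 1) = (j : Int) - c := by push_cast; ring
      rw [harg] at hih
      rw [show ((j : Int) + 1) = ((j + 1 : Nat) : Int) by push_cast; ring]
      rw [hih, runLengths, if_pos hxy]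
    · -- change at j: boundary kept, contributes difference c, new run starts
      have hcond : (PySem.List.pyGetD l (j : Int) 0 != PySem.List.pyGetD l ((j : Int) - 1) 0) = true := by
        rw [hgj, hgj1]; simpa using hxy
      rw [List.filter_cons_of_pos (by rw [hcond])]
      simp only [List.cons_append, diffs]
      have hih := ih (j + 1) y 1 hdrop' (by omega) (by omega) (by simpa using hy)
      have harg : ((j + 1 : Nat) : Int) - 1 = (j : Int) := by push_cast; ring
      rw [harg] at hih
      rw [show ((j : Int) + 1) = ((j + 1 : Nat) : Int) by push_cast; ring]
      rw [hih, runLengths, if_neg hxy]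
      congr 1
      omega

-- B's port, with the lets zeta-reduced, is diffs 0 (boundaries ++ [n])
theorem alt_eq_diffs (l : List Int) :
    evaluate_repeat_alt l = diffs 0
      ((PySem.List.pyRange 1 (l.length : Int) 1).filter
          (fun i => PySem.List.pyGetD l i 0 != PySem.List.pyGetD l (i - 1) 0)
        ++ [(l.length : Int)]) := by
  generalize hE : ((PySem.List.pyRange 1 (l.length : Int) 1).filter
          (fun i => PySem.List.pyGetD l i 0 != PySem.List.pyGetD l (i - 1) 0)
        ++ [(l.length : Int)]) = es
  have h1 : evaluate_repeat_alt l
      = (PySem.List.pyRange 0 ((((0 : Int) :: es).length : Int) - 1) 1).map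
          (fun k => PySem.List.pyGetD ((0 : Int) :: es) (k + 1) 0
            - PySem.List.pyGetD ((0 : Int) :: es) k 0) := by
    rw [← hE]; rfl
  rw [h1]
  have hlen : ((((0 : Int) :: es).length : Int) - 1) = (es.length : Int) := by simp
  rw [hlen, PySem.List.pyRange_zero_nat, List.map_map]
  have hmap :
      (List.range es.length).map
        ((fun k => PySem.List.pyGetD ((0 : Int) :: es) (k + 1) 0
            - PySem.List.pyGetD ((0 : Int) :: es) k 0) ∘ (fun n : Nat => (n : Int)))
      = (List.range es.length).map
        (fun k => ((0 : Int) :: es).getD (k + 1) 0 - ((0 : Int) :: es).getD k 0) := by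
    apply List.map_congr_left
    intro k _
    simp only [Function.comp]
    rw [show ((k : Int) + 1) = ((k + 1 : Nat) : Int) by push_cast; ring]
    rw [PySem.List.pyGetD_natCast, PySem.List.pyGetD_natCast]
  rw [hmap, map_diffs]

-- ===== VERDICT =====
theorem evaluate_repeat_spec : Claim_equal_evaluate_repeat := by
  intro notes _ hpre
  match notes with
  | [] => exact absurd rfl hpre
  | n0 :: rest =>
    show evaluate_repeat (n0 :: rest) = evaluate_repeat_alt (n0 :: rest)
    have ha : evaluate_repeat (n0 :: rest) = runLengths n0 1 rest := by
      simpa [evaluate_repeat] using foldl_run rest n0 1 []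
    have hkey := key (n0 :: rest) rest 1 n0 1 rfl le_rfl (by simp) rfl
    rw [ha, alt_eq_diffs]
    simpa using hkey.symm
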